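-- pv_equiv track=rewrite | github.com/Afool4U/OnekeyFullScore | easyJN.py | print_answers_to_list
-- ===== SOURCE A (Python) =====
-- def print_answers_to_list(patterns, questions):  # 输出答案到列表
--     answers = []
--     num = 1
--     for T in patterns:
--         for question, answer in questions.items():
--             if T in question:  # 假如匹配到了题目  --↘
--                 answers.append('{:<4}{}\n'.format(num, answer))  # 则输出答案
--                 num += 1
--                 break
--         else:
--             answers.append('{:<4}{}\n'.format(num, '无'))
--             num += 1
--         if (num - 1) % 5 == 0:
--             answers.append('\n')
--     return answers
-- ===== SOURCE B (Python) =====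
-- def print_answers_to_list(patterns, questions):
--     # Inverted traversal: sweep the questions once (outer loop), keeping a
--     # shrinking worklist of still-unresolved patterns; the first question that
--     # contains a pattern resolves it (= original first-match rule).
--     found = {}
--     pending = list(enumerate(patterns))
--     for question, answer in questions.items():
--         if not pending:
--             break
--         still = [p for p in pending if p[1] not in question]
--         if len(still) != len(pending):
--             for i, T in pending:
--                 if T in question:
--                     found[i] = answer
--             pending = still
--     answers = []
--     for i, T in enumerate(patterns):
--         ans = found.get(i, '无')
--         answers.append('{:<4}{}\n'.format(i + 1, ans))
--         if (i + 1) % 5 == 0: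
--             answers.append('\n')
--     return answers
-- ===== Notes on version B (the rewrite author's own statement) =====
-- stated objective: alternative
-- what changed: Loop nesting is inverted: instead of A's per-pattern scan of the questions with a first-match break, B sweeps the questions once as the outer loop against a shrinking worklist of unresolved patterns (resolving each on its first containing question, breaking when empty), then formats the resolved table in a separate enumerate pass with the %5 blank lines.
import Mathlib
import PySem

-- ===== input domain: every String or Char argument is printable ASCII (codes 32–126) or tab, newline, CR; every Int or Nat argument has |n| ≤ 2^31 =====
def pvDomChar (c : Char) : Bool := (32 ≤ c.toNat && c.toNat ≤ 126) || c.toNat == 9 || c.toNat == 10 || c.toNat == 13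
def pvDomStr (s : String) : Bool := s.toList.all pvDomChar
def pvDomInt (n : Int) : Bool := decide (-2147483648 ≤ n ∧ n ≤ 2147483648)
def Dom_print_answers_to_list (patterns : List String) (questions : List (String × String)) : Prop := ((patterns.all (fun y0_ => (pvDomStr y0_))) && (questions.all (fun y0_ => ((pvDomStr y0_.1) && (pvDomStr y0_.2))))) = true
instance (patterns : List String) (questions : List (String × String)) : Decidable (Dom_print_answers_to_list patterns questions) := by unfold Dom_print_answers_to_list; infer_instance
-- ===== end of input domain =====

-- B inverts A's loop nesting: one forward sweep over the questions resolves a shrinking worklist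
-- of patterns (first containing question wins), then a separate pass formats (objective: alternative).

-- '{:<4}{}\n'.format(num, ans) : str(num) left-justified to width 4, then ans, then newline
def pvFmtLine (num : Int) (ans : String) : String :=
  let cs := PySem.Int.toChars num
  String.ofList (cs ++ List.replicate (4 - cs.length) ' ') ++ ans ++ "\n"

-- ===== PORT A =====
-- inner 'for question, answer in questions.items(): if T in question: … break / else: …'
def pvFindA (T : String) : List (String × String) → Option String
  | [] => none
  | (q, a) :: rest => if PySem.Str.isIn T q then some a else pvFindA T rest

def pvLoopA (questions : List (String × String)) : List String → List String → Int → List String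
  | [], answers, _ => answers
  | T :: rest, answers, num =>
    let answers :=
      match pvFindA T questions with
      | some a => answers ++ [pvFmtLine num a]
      | none => answers ++ [pvFmtLine num "无"]
    let num := num + 1
    let answers := if PySem.Int.mod (num - 1) 5 == 0 then answers ++ ["\n"] else answers
    pvLoopA questions rest answers num

def print_answers_to_list (patterns : List String) (questions : List (String × String)) : List String :=
  pvLoopA questions patterns [] 1

-- ===== PORT B =====
-- 'still = [p for p in pending if p[1] not in question]' and the update loop over pending
def pvSweep : List (String × String) → PySem.Dict Int String → List (Int × String) → PySem.Dict Int String
  | [], found, _ => found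
  | qa :: rest, found, pending =>
    if pending.isEmpty then found
    else
      let still := pending.filter (fun p => !(PySem.Str.isIn p.2 qa.1))
      if still.length != pending.length then
        let found' := pending.foldl
          (fun d p => if PySem.Str.isIn p.2 qa.1 then d.insert p.1 qa.2 else d) found
        pvSweep rest found' still
      else
        pvSweep rest found pending

def print_answers_to_list_alt (patterns : List String) (questions : List (String × String)) : List String :=
  let found := pvSweep questions PySem.Dict.empty (PySem.List.enumerate patterns 0)
  (PySem.List.enumerate patterns 0).foldl (fun answers p =>
    let answers := answers ++ [pvFmtLine (p.1 + 1) ((found.get? p.1).getD "无")]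
    if PySem.Int.mod (p.1 + 1) 5 == 0 then answers ++ ["\n"] else answers) []

-- ===== PRECONDITION & SPEC =====
def Spec_print_answers_to_list (patterns : List String) (questions : List (String × String)) (out : List String) : Prop := out = print_answers_to_list_alt patterns questions
instance (patterns : List String) (questions : List (String × String)) (out : List String) : Decidable (Spec_print_answers_to_list patterns questions out) := by unfold Spec_print_answers_to_list; infer_instance

-- ===== CLAIM (what is proved, stated in full; the proofs are below) =====
def Claim_equal_print_answers_to_list : Prop := ∀ (patterns : List String) (questions : List (String × String)), Dom_print_answers_to_list patterns questions → Spec_print_answers_to_list patterns questions (print_answers_to_list patterns questions)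

-- ===== LEMMAS AND PROOFS =====

-- members of a nodup-keyed association list are determined by their key
theorem pvKeyInj {l : List (Int × String)} (h : (l.map Prod.fst).Nodup)
    {p x : Int × String} (hp : p ∈ l) (hx : x ∈ l) (hk : x.1 = p.1) : x = p :=
  List.inj_on_of_nodup_map h hx hp hk

-- find? by key returns the unique member with that key
theorem pvFindKey_unique {l : List (Int × String)} (h : (l.map Prod.fst).Nodup)
    {p : Int × String} (hp : p ∈ l) {i : Int} (hk : p.1 = i) :
    l.find? (fun x => x.1 == i) = some p := by
  induction l with
  | nil => cases hp
  | cons y t ih =>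
    rw [List.map_cons, List.nodup_cons] at h
    rcases List.mem_cons.mp hp with hpy | hpt
    · subst hpy
      simp only [List.find?_cons, show (p.1 == i) = true by simp [hk]]
    · have hy : (y.1 == i) = false := by
        simp only [beq_eq_false_iff_ne, ne_eq]
        intro hyi
        exact h.1 (by rw [hyi, ← hk]; exact List.mem_map_of_mem hpt)
      simp only [List.find?_cons, hy]
      exact ih h.2 hpt

theorem pvFindKey_none {l : List (Int × String)} {i : Int}
    (h : ∀ p ∈ l, p.1 ≠ i) : l.find? (fun x => x.1 == i) = none := by
  rw [List.find?_eq_none]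
  intro p hp
  simpa using h p hp

-- the update loop over the worklist: lookup in the resulting dict
theorem pvUpd_get (q a : String) (pending : List (Int × String))
    (found : PySem.Dict Int String) (i : Int)
    (h : (pending.map Prod.fst).Nodup) :
    (pending.foldl (fun d p => if PySem.Str.isIn p.2 q then d.insert p.1 a else d) found).get? i
      = match pending.find? (fun p => p.1 == i) with
        | some p => if PySem.Str.isIn p.2 q then some a else found.get? i
        | none => found.get? i := by
  induction pending generalizing found with
  | nil => simp
  | cons p rest ih =>
    rw [List.map_cons, List.nodup_cons] at h
    simp only [List.foldl_cons]
    by_cases hk : p.1 = i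
    · have hnone : rest.find? (fun x => x.1 == i) = none := by
        apply pvFindKey_none
        intro x hx hxi
        exact h.1 (by rw [hk, ← hxi]; exact List.mem_map_of_mem hx)
      simp only [List.find?_cons, show (p.1 == i) = true by simp [hk]]
      by_cases hc : PySem.Str.isIn p.2 q = true
      · rw [if_pos hc, ih _ h.2, hnone]
        simp only [if_pos hc]
        rw [hk, PySem.Dict.get?_insert_self]
      · rw [Bool.not_eq_true] at hc
        rw [hc, if_neg (by simp), ih _ h.2, hnone]
        simp only [Bool.false_eq_true, if_false]
    · simp only [List.find?_cons, show (p.1 == i) = false by simp [hk]]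
      by_cases hc : PySem.Str.isIn p.2 q = true
      · rw [if_pos hc, ih _ h.2]
        cases hfind : rest.find? (fun x => x.1 == i) with
        | none =>
          simp only
          exact PySem.Dict.get?_insert_of_ne _ _ (Ne.symm hk)
        | some x =>
          by_cases hcx : PySem.Str.isIn x.2 q = true
          · simp only [if_pos hcx]
          · rw [Bool.not_eq_true] at hcx
            simp only [hcx, Bool.false_eq_true, if_false]
            exact PySem.Dict.get?_insert_of_ne _ _ (Ne.symm hk)
      · rw [Bool.not_eq_true] at hc
        rw [hc, if_neg (by simp), ih _ h.2]

-- the sweep resolves each worklist entry to its first containing question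
theorem pvSweep_get (qs : List (String × String)) (pending : List (Int × String))
    (found : PySem.Dict Int String) (i : Int)
    (h : (pending.map Prod.fst).Nodup) :
    (pvSweep qs found pending).get? i
      = match pending.find? (fun p => p.1 == i) with
        | some p => match qs.find? (fun qa => PySem.Str.isIn p.2 qa.1) with
                    | some qa => some qa.2
                    | none => found.get? i
        | none => found.get? i := by
  induction qs generalizing pending found with
  | nil =>
    simp only [pvSweep]
    cases pending.find? (fun p => p.1 == i) <;> simp
  | cons qa rest ih =>
    simp only [pvSweep]
    by_cases hemp : pending.isEmpty = true
    · rw [if_pos hemp]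
      rw [List.isEmpty_iff] at hemp
      subst hemp
      simp
    · rw [if_neg hemp]
      by_cases hlen : ((pending.filter (fun p => !(PySem.Str.isIn p.2 qa.1))).length
          != pending.length) = true
      · rw [if_pos hlen]
        have hsub : (pending.filter (fun p => !(PySem.Str.isIn p.2 qa.1))).Sublist pending :=
          List.filter_sublist
        have hnodup' : ((pending.filter (fun p => !(PySem.Str.isIn p.2 qa.1))).map Prod.fst).Nodup :=
          List.Nodup.sublist (hsub.map Prod.fst) h
        rw [ih _ _ hnodup']
        cases hfind : pending.find? (fun p => p.1 == i) with
        | none =>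
          have hall : ∀ p ∈ pending, p.1 ≠ i := by
            intro p hp
            have := List.find?_eq_none.mp hfind p hp
            simpa using this
          rw [pvFindKey_none (fun p hp => hall p (List.mem_of_mem_filter hp))]
          rw [pvUpd_get _ _ _ _ _ h, hfind]
        | some p =>
          have hp : p ∈ pending := List.mem_of_find?_eq_some hfind
          have hpi : p.1 = i := by simpa using List.find?_some hfind
          by_cases hc : PySem.Str.isIn p.2 qa.1 = true
          · have hnone : (pending.filter (fun x => !(PySem.Str.isIn x.2 qa.1))).find?
                (fun x => x.1 == i) = none := by
              apply pvFindKey_none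
              intro x hx hxi
              have hxp : x = p := pvKeyInj h hp (List.mem_of_mem_filter hx) (by rw [hxi, hpi])
              have hc' : PySem.Chars.isIn p.2.toList qa.1.toList = true := hc
              have hmem := List.of_mem_filter hx
              rw [hxp] at hmem
              simp [hc'] at hmem
            rw [hnone, pvUpd_get _ _ _ _ _ h, hfind]
            simp only [if_pos hc]
            simp only [List.find?_cons, hc]
          · rw [Bool.not_eq_true] at hc
            have hsome : (pending.filter (fun x => !(PySem.Str.isIn x.2 qa.1))).find?
                (fun x => x.1 == i) = some p := by
              apply pvFindKey_unique hnodup'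
              · exact List.mem_filter.mpr ⟨hp, by simpa using hc⟩
              · exact hpi
            rw [hsome, pvUpd_get _ _ _ _ _ h, hfind]
            simp only [hc, Bool.false_eq_true, if_false]
            simp only [List.find?_cons, hc]
      · rw [if_neg hlen]
        have hlen' : (pending.filter (fun p => !(PySem.Str.isIn p.2 qa.1))).length
            = pending.length := by simpa using hlen
        have heq : pending.filter (fun p => !(PySem.Str.isIn p.2 qa.1)) = pending :=
          List.Sublist.eq_of_length List.filter_sublist hlen'
        have hall : ∀ p ∈ pending, PySem.Str.isIn p.2 qa.1 = false := by
          intro p hp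
          have := List.filter_eq_self.mp heq p hp
          simpa using this
        rw [ih _ _ h]
        cases hfind : pending.find? (fun p => p.1 == i) with
        | none => rfl
        | some p =>
          have hp : p ∈ pending := List.mem_of_find?_eq_some hfind
          simp only [List.find?_cons, hall p hp]

-- enumerate commutes with map on the elements
theorem pvEnumerateMap (f : String → String) (ps : List String) (s : Int) :
    PySem.List.enumerate (ps.map f) s
      = (PySem.List.enumerate ps s).map (fun p => (p.1, f p.2)) := by
  induction ps generalizing s with
  | nil => simp [PySem.List.enumerate_nil]
  | cons T rest ih => simp [PySem.List.enumerate_cons, ih]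

-- the fully-resolved table, read at a pattern's index, is the first-match answer (default '无')
theorem pvSweepLookup (patterns : List String) (questions : List (String × String))
    (p : Int × String) (hp : p ∈ PySem.List.enumerate patterns 0) :
    ((pvSweep questions PySem.Dict.empty (PySem.List.enumerate patterns 0)).get? p.1).getD "无"
      = ((questions.find? (fun qa => PySem.Str.isIn p.2 qa.1)).map Prod.snd).getD "无" := by
  have hnodup : ((PySem.List.enumerate patterns 0).map Prod.fst).Nodup := by
    rw [PySem.List.map_fst_enumerate]
    exact PySem.List.nodup_pyRange_one _ _
  rw [pvSweep_get questions _ _ p.1 hnodup, pvFindKey_unique hnodup hp rfl]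
  cases hq : questions.find? (fun qa => PySem.Chars.isIn p.2.toList qa.1.toList) <;>
    simp [PySem.Str.isIn, hq]

-- A's inner loop is find?-then-default
theorem pvFindA_eq (T : String) (qs : List (String × String)) :
    pvFindA T qs = (qs.find? (fun qa => PySem.Str.isIn T qa.1)).map Prod.snd := by
  induction qs with
  | nil => rfl
  | cons qa rest ih =>
    obtain ⟨q, a⟩ := qa
    simp only [pvFindA, List.find?, PySem.Str.isIn] at *
    by_cases hc : PySem.Chars.isIn T.toList q.toList = true
    · simp [hc]
    · rw [Bool.not_eq_true] at hc
      simp [hc, ih]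

-- A's main loop equals the enumerate-foldl formatting pass over the matched answers
theorem pvLoop_eq (questions : List (String × String)) (ps : List String)
    (acc : List String) (k : Nat) :
    pvLoopA questions ps acc ((k : Int) + 1) =
    (PySem.List.enumerate (ps.map (fun T =>
        ((questions.find? (fun qa => PySem.Str.isIn T qa.1)).map Prod.snd).getD "无")) (k : Int)).foldl
      (fun answers p =>
        let answers := answers ++ [pvFmtLine (p.1 + 1) p.2]
        if PySem.Int.mod (p.1 + 1) 5 == 0 then answers ++ ["\n"] else answers) acc := by
  induction ps generalizing acc k with
  | nil => simp [pvLoopA, PySem.List.enumerate_nil]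
  | cons T rest ih =>
    simp only [List.map_cons, PySem.List.enumerate_cons, List.foldl_cons]
    simp only [pvLoopA, pvFindA_eq]
    have hnum : (k : Int) + 1 + 1 - 1 = (k : Int) + 1 := by ring
    have hstep := ih (k := k + 1)
    push_cast at hstep
    cases hfind : (questions.find? (fun qa => PySem.Str.isIn T qa.1)).map Prod.snd with
    | none =>
      simp only [Option.getD_none, hnum]
      rw [show (k : Int) + 1 + 1 = ((k : Int) + 1) + 1 by ring, hstep]
    | some a =>
      simp only [Option.getD_some, hnum]
      rw [show (k : Int) + 1 + 1 = ((k : Int) + 1) + 1 by ring, hstep]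

-- ===== VERDICT (by name: the statement is the Claim_ definition above) =====
theorem print_answers_to_list_spec : Claim_equal_print_answers_to_list := by
  intro patterns questions _
  unfold Spec_print_answers_to_list print_answers_to_list print_answers_to_list_alt
  have hA := pvLoop_eq questions patterns [] 0
  simp only [Int.natCast_zero, Int.zero_add] at hA
  rw [hA, pvEnumerateMap, List.foldl_map]
  apply PySem.List.foldl_congr_mem
  intro acc p hp
  simp only [pvSweepLookup patterns questions p hp]
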